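-- pv_equiv track=rewrite | github.com/aakashunnikrishnan/Python_dump | arrays/find_peak_with_plateau.py | find_peak_with_plateau
-- ===== SOURCE A (Python) =====
-- def find_peak_with_plateau(nums):
--     """Find peak element (element >= neighbors, handles plateaus)"""
--     if not nums:
--         return None
--
--     n = len(nums)
--
--     # Check first element
--     if n == 1 or nums[0] >= nums[1]:
--         return 0
--
--     # Check middle elements
--     for i in range(1, n - 1):
--         if nums[i] >= nums[i - 1] and nums[i] >= nums[i + 1]:
--             return i
--
--     # Check last element
--     if nums[-1] >= nums[-2]:
--         return n - 1
--
--     return None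
-- ===== SOURCE B (Python) =====
-- def find_peak_with_plateau(nums):
--     """Find peak element (element >= neighbors, handles plateaus)"""
--     if not nums:
--         return None
--     # Walk the values pairwise: the array is strictly increasing until the
--     # leftmost peak, so the index of the first non-ascent (or the last index
--     # if the walk never stops) is the answer. No indexing into nums at all.
--     i = 0
--     prev = nums[0]
--     for cur in nums[1:]:
--         if prev >= cur:
--             return i
--         prev = cur
--         i += 1
--     return i
-- ===== Notes on version B (the rewrite author's own statement) =====
-- stated objective: simpler
-- what changed: Replaces A's three-way index-based case split (first element, middle loop with two-neighbour index checks, last element) by a value-carrying forward walk over the list (prev/cur accumulator, no index arithmetic) that stops at the first non-ascent, correct because the prefix before the leftmost peak is strictly increasing.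
import Mathlib
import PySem

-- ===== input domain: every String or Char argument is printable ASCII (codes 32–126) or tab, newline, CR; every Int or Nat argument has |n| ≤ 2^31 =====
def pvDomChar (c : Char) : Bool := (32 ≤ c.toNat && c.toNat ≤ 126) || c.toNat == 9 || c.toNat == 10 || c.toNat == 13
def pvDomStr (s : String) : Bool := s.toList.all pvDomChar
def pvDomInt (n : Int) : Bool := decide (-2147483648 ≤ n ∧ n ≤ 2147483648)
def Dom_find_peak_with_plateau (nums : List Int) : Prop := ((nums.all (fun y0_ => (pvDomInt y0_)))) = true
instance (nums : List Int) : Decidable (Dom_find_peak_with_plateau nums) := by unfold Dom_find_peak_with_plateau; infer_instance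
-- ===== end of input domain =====

-- B replaces A's index-based first/middle/last case split by a value-carrying
-- structural walk (prev/cur accumulator) stopping at the first non-ascent;
-- same O(n) cost, simpler shape.


-- ===== PORT A =====
-- every index access A makes is in range (the pyGetD default 0 is never used)
def find_peak_with_plateau (nums : List Int) : Option Int :=
  if nums = [] then none
  else
    let n : Int := nums.length
    -- check first element
    if n = 1 ∨ PySem.List.pyGetD nums 1 0 ≤ PySem.List.pyGetD nums 0 0 then some 0
    else
      -- check middle elements: for i in range(1, n-1), early return on first peak
      match (PySem.List.pyRange 1 (n - 1) 1).find? (fun i =>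
          decide (PySem.List.pyGetD nums (i - 1) 0 ≤ PySem.List.pyGetD nums i 0) &&
          decide (PySem.List.pyGetD nums (i + 1) 0 ≤ PySem.List.pyGetD nums i 0)) with
      | some i => some i
      | none =>
        -- check last element
        if PySem.List.pyGetD nums (-2) 0 ≤ PySem.List.pyGetD nums (-1) 0 then some (n - 1)
        else none

-- ===== PORT B =====
-- the for-loop over nums[1:] with state (i, prev) and early return, as a
-- structural recursion on the remaining values
def pvWalk (i : Int) (prev : Int) : List Int → Int
  | [] => i
  | cur :: rest => if prev ≥ cur then i else pvWalk (i + 1) cur rest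

def find_peak_with_plateau_alt (nums : List Int) : Option Int :=
  match nums with
  | [] => none
  | x :: xs => some (pvWalk 0 x xs)

-- ===== PRECONDITION & SPEC =====
def Spec_find_peak_with_plateau (nums : List Int) (out : Option Int) : Prop := out = find_peak_with_plateau_alt nums
instance (nums : List Int) (out : Option Int) : Decidable (Spec_find_peak_with_plateau nums out) := by unfold Spec_find_peak_with_plateau; infer_instance

-- ===== CLAIM (what is proved, stated in full; the proofs are below) =====
def Claim_equal_find_peak_with_plateau : Prop := ∀ (nums : List Int), Dom_find_peak_with_plateau nums → Spec_find_peak_with_plateau nums (find_peak_with_plateau nums)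

-- ===== LEMMAS AND PROOFS =====

-- proof-side bridge: the first index i in [0, n-1) with nums[i] >= nums[i+1], else n-1
def pvScanIdx (nums : List Int) : Option Int :=
  if nums = [] then none
  else
    let n : Int := nums.length
    match (PySem.List.pyRange 0 (n - 1) 1).find? (fun i =>
        decide (PySem.List.pyGetD nums (i + 1) 0 ≤ PySem.List.pyGetD nums i 0)) with
    | some i => some i
    | none => some (n - 1)

-- find? over an integer range, cons form, counted by a Nat fuel
theorem find?_pyRange_some_aux (p : Int → Bool) (k : Nat) :
    ∀ (a i : Int), ((PySem.List.pyRange a (a + k) 1).find? p = some i ↔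
      a ≤ i ∧ i < a + k ∧ p i = true ∧ ∀ j, a ≤ j → j < i → p j = false) := by
  induction k with
  | zero =>
    intro a i
    rw [PySem.List.pyRange_one_eq_nil (by omega)]
    simp; omega
  | succ m ih =>
    intro a i
    rw [PySem.List.pyRange_one_cons (by omega : a < a + (m + 1 : Nat))]
    rw [List.find?_cons]
    by_cases hpa : p a = true
    · simp [hpa]
      constructor
      · rintro rfl
        refine ⟨le_refl _, by omega, hpa, ?_⟩
        intro j h1 h2; omega
      · rintro ⟨h1, _, _, h4⟩
        by_contra hne
        have hlt : a < i := by omega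
        have := h4 a (le_refl _) hlt
        simp [hpa] at this
    · simp only [hpa]
      have := ih (a + 1) i
      have harith : a + 1 + (m : Int) = a + ((m + 1 : Nat) : Int) := by push_cast; ring
      rw [harith] at this
      rw [this]
      constructor
      · rintro ⟨h1, h2, h3, h4⟩
        exact ⟨by omega, h2, h3, fun j hj1 hj2 => by
          rcases eq_or_lt_of_le hj1 with rfl | h
          · simpa using hpa
          · exact h4 j (by omega) hj2⟩
      · rintro ⟨h1, h2, h3, h4⟩
        have hia : i ≠ a := fun h => by subst h; simp [h3] at hpa
        exact ⟨by omega, h2, h3, fun j hj1 hj2 => h4 j (by omega) hj2⟩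

theorem find?_pyRange_some (p : Int → Bool) (a b i : Int) :
    (PySem.List.pyRange a b 1).find? p = some i ↔
      a ≤ i ∧ i < b ∧ p i = true ∧ ∀ j, a ≤ j → j < i → p j = false := by
  by_cases hab : b ≤ a
  · rw [PySem.List.pyRange_one_eq_nil hab]; simp; omega
  · have hb : b = a + ((b - a).toNat : Int) := by omega
    rw [hb]; exact find?_pyRange_some_aux p (b - a).toNat a i

theorem find?_pyRange_none (p : Int → Bool) (a b : Int) :
    (PySem.List.pyRange a b 1).find? p = none ↔ ∀ i, a ≤ i → i < b → p i = false := by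
  rw [List.find?_eq_none]
  constructor
  · intro h i h1 h2
    simpa using h i (by rw [PySem.List.mem_pyRange_one]; exact ⟨h1, h2⟩)
  · intro h x hx
    rw [PySem.List.mem_pyRange_one] at hx
    simp [h x hx.1 hx.2]

-- pyGetD at a nonnegative in-range Int index, stated on Int arithmetic
theorem pyGetD_neg_eq_pos (nums : List Int) (k : Int) (h1 : 0 < k) (h2 : k ≤ (nums.length : Int)) :
    PySem.List.pyGetD nums (-k) 0 = PySem.List.pyGetD nums ((nums.length : Int) - k) 0 := by
  have hk : k = ((k.toNat : Nat) : Int) := by omega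
  have hlt : nums.length - k.toNat < nums.length := by omega
  rw [hk, PySem.List.pyGetD_neg_natCast nums k.toNat 0 (by omega) (by omega),
      show ((nums.length : Int) - ((k.toNat : Nat) : Int)) = ((nums.length - k.toNat : Nat) : Int) by omega,
      PySem.List.pyGetD_natCast, List.getD_eq_getElem _ _ hlt]

-- stepping pyGetD past a cons for a positive Int index
theorem pyGetD_cons_pos (a : Int) (l : List Int) (j : Int) (h : 1 ≤ j) :
    PySem.List.pyGetD (a :: l) j 0 = PySem.List.pyGetD l (j - 1) 0 := by
  have hj : j = ((j.toNat : Nat) : Int) := by omega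
  have hj1 : j - 1 = (((j.toNat - 1 : Nat)) : Int) := by omega
  rcases Nat.exists_eq_succ_of_ne_zero (show j.toNat ≠ 0 by omega) with ⟨m, hm⟩
  rw [show j = (((m + 1 : Nat)) : Int) by omega,
      show (((m + 1 : Nat)) : Int) - 1 = ((m : Nat) : Int) by push_cast; ring,
      PySem.List.pyGetD_natCast, PySem.List.pyGetD_natCast]
  simp

-- pvWalk only adds to its counter
theorem pvWalk_shift (xs : List Int) : ∀ (i prev : Int),
    pvWalk i prev xs = i + pvWalk 0 prev xs := by
  induction xs with
  | nil => intro i prev; simp [pvWalk]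
  | cons c r ih =>
    intro i prev
    by_cases h : prev ≥ c
    · simp [pvWalk, h]
    · simp only [pvWalk, if_neg h]
      rw [ih (i + 1) c, ih (0 + 1) c]; ring

theorem pvWalk_bounds (xs : List Int) : ∀ (prev : Int),
    0 ≤ pvWalk 0 prev xs ∧ pvWalk 0 prev xs ≤ (xs.length : Int) := by
  induction xs with
  | nil => intro prev; simp [pvWalk]
  | cons c r ih =>
    intro prev
    by_cases h : prev ≥ c
    · simp [pvWalk, h]; omega
    · simp only [pvWalk, if_neg h]
      rw [pvWalk_shift r (0 + 1) c]
      have := ih c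
      simp; omega

-- before the walk stops the values strictly increase
theorem pvWalk_inc (xs : List Int) : ∀ (prev : Int) (j : Int), 0 ≤ j →
    j < pvWalk 0 prev xs →
    PySem.List.pyGetD (prev :: xs) j 0 < PySem.List.pyGetD (prev :: xs) (j + 1) 0 := by
  induction xs with
  | nil => intro prev j h1 h2; simp [pvWalk] at h2; omega
  | cons c r ih =>
    intro prev j h1 h2
    simp only [pvWalk] at h2
    by_cases h : prev ≥ c
    · rw [if_pos h] at h2; omega
    · rw [if_neg h, pvWalk_shift r (0 + 1) c] at h2
      rcases eq_or_lt_of_le h1 with rfl | hj1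
      · -- j = 0: prev < c
        have h0 : PySem.List.pyGetD (prev :: c :: r) 0 0 = prev := by
          simpa using PySem.List.pyGetD_natCast (prev :: c :: r) 0 0
        have h1' : PySem.List.pyGetD (prev :: c :: r) 1 0 = c := by
          simpa using PySem.List.pyGetD_natCast (prev :: c :: r) 1 0
        rw [show (0 : Int) + 1 = 1 by ring, h0, h1']
        omega
      · -- j ≥ 1: step past the head
        rw [pyGetD_cons_pos prev (c :: r) j (by omega),
            pyGetD_cons_pos prev (c :: r) (j + 1) (by omega),
            show j + 1 - 1 = (j - 1) + 1 by ring]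
        exact ih c (j - 1) (by omega) (by omega)

-- if the walk stops early there is a non-ascent at its stopping index
theorem pvWalk_stop (xs : List Int) : ∀ (prev : Int),
    pvWalk 0 prev xs < (xs.length : Int) →
    PySem.List.pyGetD (prev :: xs) (pvWalk 0 prev xs + 1) 0 ≤
      PySem.List.pyGetD (prev :: xs) (pvWalk 0 prev xs) 0 := by
  induction xs with
  | nil => intro prev h; simp [pvWalk] at h
  | cons c r ih =>
    intro prev h
    simp only [pvWalk] at h ⊢
    by_cases hpc : prev ≥ c
    · rw [if_pos hpc] at h ⊢
      have h0 : PySem.List.pyGetD (prev :: c :: r) 0 0 = prev := by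
        simpa using PySem.List.pyGetD_natCast (prev :: c :: r) 0 0
      have h1' : PySem.List.pyGetD (prev :: c :: r) 1 0 = c := by
        simpa using PySem.List.pyGetD_natCast (prev :: c :: r) 1 0
      rw [show (0 : Int) + 1 = 1 by ring, h0, h1']
      omega
    · rw [if_neg hpc] at h ⊢
      rw [pvWalk_shift r (0 + 1) c] at h ⊢
      have hb := pvWalk_bounds r c
      set W := pvWalk 0 c r with hW
      have hWr : W < (r.length : Int) := by simp at h; omega
      rw [pyGetD_cons_pos prev (c :: r) (0 + 1 + W + 1) (by omega),
          pyGetD_cons_pos prev (c :: r) (0 + 1 + W) (by omega),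
          show 0 + 1 + W + 1 - 1 = W + 1 by ring, show 0 + 1 + W - 1 = W by ring]
      exact ih c hWr

-- the walk computes the same index as the find?-style scan
theorem pvScanIdx_eq_alt (nums : List Int) :
    pvScanIdx nums = find_peak_with_plateau_alt nums := by
  match nums with
  | [] => rfl
  | x :: xs =>
    unfold pvScanIdx find_peak_with_plateau_alt
    simp only [reduceCtorEq, if_false]
    set n : Int := ((x :: xs).length : Int) with hn
    have hnlen : n = (xs.length : Int) + 1 := by simp [hn]
    set W := pvWalk 0 x xs with hW
    have hb := pvWalk_bounds xs x
    rw [← hW] at hb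
    by_cases hstop : W < (xs.length : Int)
    · have : (PySem.List.pyRange 0 (n - 1) 1).find? (fun i =>
          decide (PySem.List.pyGetD (x :: xs) (i + 1) 0 ≤ PySem.List.pyGetD (x :: xs) i 0)) = some W := by
        rw [find?_pyRange_some]
        refine ⟨hb.1, by omega, ?_, ?_⟩
        · simpa using pvWalk_stop xs x hstop
        · intro j h1 h2
          have := pvWalk_inc xs x j h1 (by omega)
          simp only [decide_eq_false_iff_not, not_le]
          exact this
      rw [this]
    · have hWeq : W = (xs.length : Int) := by omega
      have : (PySem.List.pyRange 0 (n - 1) 1).find? (fun i =>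
          decide (PySem.List.pyGetD (x :: xs) (i + 1) 0 ≤ PySem.List.pyGetD (x :: xs) i 0)) = none := by
        rw [find?_pyRange_none]
        intro i h1 h2
        have := pvWalk_inc xs x i h1 (by omega)
        simp only [decide_eq_false_iff_not, not_le]
        exact this
      rw [this]
      simp only [Option.some.injEq]
      omega

-- A computes the same index as the find?-style scan
theorem find_peak_with_plateau_eq_scan (nums : List Int) :
    find_peak_with_plateau nums = pvScanIdx nums := by
  unfold find_peak_with_plateau pvScanIdx
  by_cases hnil : nums = []
  · simp [hnil]
  · simp only [hnil, if_false]
    set n : Int := (nums.length : Int) with hn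
    have hn1 : 1 ≤ n := by
      have := List.length_pos_iff.mpr hnil
      omega
    set g : Int → Int := fun i => PySem.List.pyGetD nums i 0 with hg
    by_cases hone : n = 1
    · -- the scan's range(0) is empty, so it also returns n - 1 = 0
      rw [if_pos (Or.inl hone)]
      rw [hone, show (1 : Int) - 1 = 0 by ring, PySem.List.pyRange_zero]
      simp
    · have hn2 : 2 ≤ n := by omega
      by_cases hfst : g 1 ≤ g 0
      · -- first element is a peak; the scan hits it at i = 0
        rw [if_pos (Or.inr hfst)]
        have : (PySem.List.pyRange 0 (n - 1) 1).find?
            (fun i => decide (PySem.List.pyGetD nums (i + 1) 0 ≤ PySem.List.pyGetD nums i 0)) = some 0 := by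
          rw [find?_pyRange_some]
          exact ⟨le_refl _, by omega, by simpa using hfst, fun j h1 h2 => absurd h1 (by omega)⟩
        rw [this]
      · -- g 0 < g 1; compare the two scans
        rw [if_neg (fun h => h.elim hone hfst)]
        have hfst' : g 0 < g 1 := not_le.mp hfst
        cases hB : (PySem.List.pyRange 0 (n - 1) 1).find?
            (fun i => decide (PySem.List.pyGetD nums (i + 1) 0 ≤ PySem.List.pyGetD nums i 0)) with
        | none =>
          -- strictly increasing throughout: A falls through to the last element
          rw [find?_pyRange_none] at hB
          have hinc : ∀ i, 0 ≤ i → i < n - 1 → g i < g (i + 1) := by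
            intro i h1 h2
            have := hB i h1 h2
            simp only [decide_eq_false_iff_not, not_le] at this
            exact this
          have hA : (PySem.List.pyRange 1 (n - 1) 1).find?
              (fun i => decide (PySem.List.pyGetD nums (i - 1) 0 ≤ PySem.List.pyGetD nums i 0) &&
                decide (PySem.List.pyGetD nums (i + 1) 0 ≤ PySem.List.pyGetD nums i 0)) = none := by
            rw [find?_pyRange_none]
            intro i h1 h2
            have := hinc i (by omega) h2
            simp only [Bool.and_eq_false_iff, decide_eq_false_iff_not, not_le]
            right; exact this
          rw [hA]
          have hlast : g (n - 2) < g (n - 1) := by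
            have := hinc (n - 2) (by omega) (by omega)
            simpa [show n - 2 + 1 = n - 1 by ring] using this
          rw [pyGetD_neg_eq_pos nums 2 (by omega) (by omega),
              pyGetD_neg_eq_pos nums 1 (by omega) (by omega)]
          rw [if_pos (le_of_lt hlast)]
        | some i =>
          -- first non-ascent at i ≥ 1: it is also A's first middle peak
          rw [find?_pyRange_some] at hB
          obtain ⟨h0i, hilt, hpi, hmin⟩ := hB
          simp only [decide_eq_true_eq] at hpi
          have hinc : ∀ j, 0 ≤ j → j < i → g j < g (j + 1) := by
            intro j h1 h2
            have := hmin j h1 h2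
            simp only [decide_eq_false_iff_not, not_le] at this
            exact this
          have hi1 : 1 ≤ i := by
            by_contra h
            have : i = 0 := by omega
            subst this
            exact absurd hpi (not_le.mpr hfst')
          have hA : (PySem.List.pyRange 1 (n - 1) 1).find?
              (fun j => decide (PySem.List.pyGetD nums (j - 1) 0 ≤ PySem.List.pyGetD nums j 0) &&
                decide (PySem.List.pyGetD nums (j + 1) 0 ≤ PySem.List.pyGetD nums j 0)) = some i := by
            rw [find?_pyRange_some]
            refine ⟨hi1, hilt, ?_, ?_⟩
            · have hprev : g (i - 1) < g i := by
                have := hinc (i - 1) (by omega) (by omega)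
                simpa [show i - 1 + 1 = i by ring] using this
              simp only [Bool.and_eq_true, decide_eq_true_eq]
              exact ⟨le_of_lt hprev, hpi⟩
            · intro j h1 h2
              have := hinc j (by omega) h2
              simp only [Bool.and_eq_false_iff, decide_eq_false_iff_not, not_le]
              right; exact this
          rw [hA]

-- ===== VERDICT (by name: the statement is the Claim_ definition above) =====
theorem find_peak_with_plateau_spec : Claim_equal_find_peak_with_plateau := by
  intro nums _
  unfold Spec_find_peak_with_plateau
  rw [find_peak_with_plateau_eq_scan, pvScanIdx_eq_alt]
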